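-- pv_equiv track=rewrite | github.com/DarlanNoetzold/Q-OPSEC | kms_service_v2/key_manager.py | _normalize_oqs_algorithm
-- ===== SOURCE A (Python) =====
-- from typing import Optional, Tuple
--
-- def _normalize_oqs_algorithm(requested: str, kem_mechs: list, sig_mechs: list) -> Tuple[Optional[str], str]:
--     """Map requested algorithm name to available OQS mechanism."""
--     if not requested:
--         return None, ""
--
--     if requested in kem_mechs:
--         return requested, "kem"
--     if requested in sig_mechs:
--         return requested, "sig"
--
--     aliases = {
--         "Kyber512": "ML-KEM-512",
--         "Kyber768": "ML-KEM-768",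
--         "Kyber1024": "ML-KEM-1024",
--         "Dilithium2": "ML-DSA-44",
--         "Dilithium3": "ML-DSA-65",
--         "Dilithium5": "ML-DSA-87",
--     }
--
--     candidate = aliases.get(requested)
--     if candidate:
--         if candidate in kem_mechs:
--             return candidate, "kem"
--         if candidate in sig_mechs:
--             return candidate, "sig"
--
--     def normalize(s: str) -> str:
--         return s.replace("-", "").replace("_", "").upper()
--
--     rq = normalize(requested)
--     for m in kem_mechs:
--         if normalize(m) == rq:
--             return m, "kem"
--     for m in sig_mechs:
--         if normalize(m) == rq:
--             return m, "sig"
--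
--     return None, ""
-- ===== SOURCE B (Python) =====
-- # B: precompute one tagged-key resolution table (exact > alias > normalized, kem > sig,
-- # first insertion wins via setdefault), then answer with chained lookups instead of scans.
-- def _normalize_oqs_algorithm(requested: str, kem_mechs: list, sig_mechs: list):
--     if not requested:
--         return None, ""
--
--     def normalize(s: str) -> str:
--         return s.replace("-", "").replace("_", "").upper()
--
--     aliases = {
--         "Kyber512": "ML-KEM-512",
--         "Kyber768": "ML-KEM-768",
--         "Kyber1024": "ML-KEM-1024",
--         "Dilithium2": "ML-DSA-44",
--         "Dilithium3": "ML-DSA-65",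
--         "Dilithium5": "ML-DSA-87",
--     }
--
--     pairs = (
--         [(("x", m), (m, "kem")) for m in kem_mechs]
--         + [(("x", m), (m, "sig")) for m in sig_mechs]
--         + [(("a", a), (c, "kem" if c in kem_mechs else "sig"))
--            for a, c in aliases.items() if c in kem_mechs or c in sig_mechs]
--         + [(("n", normalize(m)), (m, "kem")) for m in kem_mechs]
--         + [(("n", normalize(m)), (m, "sig")) for m in sig_mechs]
--     )
--     table = {}
--     for k, v in pairs:
--         table.setdefault(k, v)
--
--     return (table.get(("x", requested))
--             or table.get(("a", requested))
--             or table.get(("n", normalize(requested)))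
--             or (None, ""))
-- ===== Notes on version B (the rewrite author's own statement) =====
-- stated objective: alternative
-- what changed: Replaces A's three sequential scans (exact membership, alias resolution, normalized-name loops) by precomputing one tagged-key resolution table in reverse-priority order (first insertion wins via setdefault) and answering with dictionary lookups.
import Mathlib
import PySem

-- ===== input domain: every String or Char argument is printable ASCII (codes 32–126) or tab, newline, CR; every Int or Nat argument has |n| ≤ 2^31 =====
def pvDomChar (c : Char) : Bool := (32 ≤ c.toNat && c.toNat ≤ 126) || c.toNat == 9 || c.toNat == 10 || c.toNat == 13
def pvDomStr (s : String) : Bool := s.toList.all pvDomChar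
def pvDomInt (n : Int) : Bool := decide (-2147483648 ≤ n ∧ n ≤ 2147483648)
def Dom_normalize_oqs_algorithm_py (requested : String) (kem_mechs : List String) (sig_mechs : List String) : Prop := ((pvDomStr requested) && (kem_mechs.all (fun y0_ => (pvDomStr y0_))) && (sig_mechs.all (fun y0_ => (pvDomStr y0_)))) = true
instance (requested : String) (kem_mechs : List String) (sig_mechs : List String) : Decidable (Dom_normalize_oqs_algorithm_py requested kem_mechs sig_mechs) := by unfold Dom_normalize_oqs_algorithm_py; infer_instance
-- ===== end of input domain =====

-- B precomputes one tagged-key resolution table (exact > alias > normalized, kem > sig,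
-- first insertion wins via setdefault) and answers by lookup instead of A's sequential scans.


-- ===== PORT A =====
-- shared helper: BOTH Python versions define this identical local 'normalize'
def pvNormalize (s : String) : String :=
  PySem.Str.upper (PySem.Str.replace (PySem.Str.replace s "-" "") "_" "")

-- shared literal: the 'aliases' table both Python versions carry
def pvAliasItems : List (String × String) :=
  [("Kyber512", "ML-KEM-512"), ("Kyber768", "ML-KEM-768"), ("Kyber1024", "ML-KEM-1024"),
   ("Dilithium2", "ML-DSA-44"), ("Dilithium3", "ML-DSA-65"), ("Dilithium5", "ML-DSA-87")]

-- A's 'for m in mechs: if normalize(m) == rq: return m, tag' loop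
def pvScanA (rq tag : String) : List String → Option (Option String × String)
  | [] => none
  | m :: rest => if pvNormalize m == rq then some (some m, tag) else pvScanA rq tag rest

def normalize_oqs_algorithm_py (requested : String) (kem_mechs : List String) (sig_mechs : List String) : Option String × String :=
  if requested == "" then (none, "")
  else if kem_mechs.contains requested then (some requested, "kem")
  else if sig_mechs.contains requested then (some requested, "sig")
  else
    let aliases : PySem.Dict String String := PySem.Dict.ofList pvAliasItems
    let aliasHit : Option (Option String × String) :=
      match aliases.get? requested with
      | some c =>
        -- 'if candidate:' — truthiness of the optional string: none or "" is falsy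
        if c ≠ "" then
          if kem_mechs.contains c then some (some c, "kem")
          else if sig_mechs.contains c then some (some c, "sig")
          else none
        else none
      | none => none
    match aliasHit with
    | some r => r
    | none =>
      let rq := pvNormalize requested
      match pvScanA rq "kem" kem_mechs with
      | some r => r
      | none =>
        match pvScanA rq "sig" sig_mechs with
        | some r => r
        | none => (none, "")

-- ===== PORT B =====
-- one alias entry of B's comprehension: resolvable aliases only
def pvAliasEntry (kem_mechs sig_mechs : List String) (p : String × String) :
    Option ((String × String) × (Option String × String)) :=
  if kem_mechs.contains p.2 || sig_mechs.contains p.2 then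
    some (("a", p.1), (some p.2, if kem_mechs.contains p.2 then "kem" else "sig"))
  else none

-- B's 'pairs' list, in priority order (exact kem, exact sig, aliases, normalized kem, normalized sig)
def pvPairs (kem_mechs sig_mechs : List String) :
    List ((String × String) × (Option String × String)) :=
  kem_mechs.map (fun m => (("x", m), (some m, "kem")))
  ++ sig_mechs.map (fun m => (("x", m), (some m, "sig")))
  ++ pvAliasItems.filterMap (pvAliasEntry kem_mechs sig_mechs)
  ++ kem_mechs.map (fun m => (("n", pvNormalize m), (some m, "kem")))
  ++ sig_mechs.map (fun m => (("n", pvNormalize m), (some m, "sig")))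

def normalize_oqs_algorithm_py_alt (requested : String) (kem_mechs : List String) (sig_mechs : List String) : Option String × String :=
  if requested == "" then (none, "")
  else
    let table : PySem.Dict (String × String) (Option String × String) :=
      (pvPairs kem_mechs sig_mechs).foldl (fun d kv => d.setdefault kv.1 kv.2) PySem.Dict.empty
    -- 'a or b' chain: the stored tuples are always truthy in Python, so this is Option.orElse
    (((table.get? ("x", requested)).orElse fun _ =>
       (table.get? ("a", requested)).orElse fun _ =>
         table.get? ("n", pvNormalize requested))).getD (none, "")

-- ===== PRECONDITION & SPEC =====
def Spec_normalize_oqs_algorithm_py (requested : String) (kem_mechs : List String) (sig_mechs : List String) (out : Option String × String) : Prop := out = normalize_oqs_algorithm_py_alt requested kem_mechs sig_mechs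
instance (requested : String) (kem_mechs : List String) (sig_mechs : List String) (out : Option String × String) : Decidable (Spec_normalize_oqs_algorithm_py requested kem_mechs sig_mechs out) := by unfold Spec_normalize_oqs_algorithm_py; infer_instance

-- ===== CLAIM (what is proved, stated in full; the proofs are below) =====
def Claim_equal_normalize_oqs_algorithm_py : Prop := ∀ (requested : String) (kem_mechs : List String) (sig_mechs : List String), Dom_normalize_oqs_algorithm_py requested kem_mechs sig_mechs → Spec_normalize_oqs_algorithm_py requested kem_mechs sig_mechs (normalize_oqs_algorithm_py requested kem_mechs sig_mechs)

-- ===== LEMMAS AND PROOFS =====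

-- lookup in the setdefault-built table = first matching pair in the build list
lemma get?_foldl_setdefault {κ ν : Type} [BEq κ] [LawfulBEq κ]
    (pairs : List (κ × ν)) (d : PySem.Dict κ ν) (k : κ) :
    (pairs.foldl (fun d kv => d.setdefault kv.1 kv.2) d).get? k
      = (d.get? k).orElse (fun _ => (pairs.find? (fun kv => kv.1 == k)).map (·.2)) := by
  induction pairs generalizing d with
  | nil => cases h : d.get? k <;> simp [Option.orElse, h]
  | cons kv rest ih =>
    simp only [List.foldl_cons]
    rw [ih]
    by_cases hk : kv.1 = k
    · subst hk
      rw [PySem.Dict.get?_setdefault_self]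
      cases h : d.get? kv.1 <;> simp [List.find?, Option.orElse, h]
    · rw [PySem.Dict.get?_setdefault_of_ne d kv.2 (Ne.symm hk)]
      have : (kv.1 == k) = false := by simp [hk]
      simp [List.find?, this]

lemma pvScanA_eq (rq tag : String) (l : List String) :
    pvScanA rq tag l = (l.find? (fun m => pvNormalize m == rq)).map (fun m => (some m, tag)) := by
  induction l with
  | nil => simp [pvScanA]
  | cons m rest ih =>
    by_cases h : pvNormalize m == rq
    · simp [pvScanA, List.find?, h]
    · simp only [Bool.not_eq_true] at h
      simp [pvScanA, List.find?, h, ih]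

lemma find?_beq_self (l : List String) (x : String) :
    l.find? (fun m => m == x) = if l.contains x then some x else none := by
  induction l with
  | nil => simp
  | cons m rest ih =>
    by_cases h : m = x
    · subst h; simp [List.find?]
    · have hb : (m == x) = false := by simp [h]
      have hx : ¬ x = m := fun hxm => h hxm.symm
      simp [List.find?, hb, ih, hx]

-- the tagged map segments: mismatched tag finds nothing
lemma find?_tagseg_ne (t t' : String) (g : String → String) (tag2 : String)
    (l : List String) (q : String) (h : t ≠ t') :
    (l.map (fun m => ((t, g m), (some m, tag2)))).find? (fun kv => kv.1 == (t', q)) = none := by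
  rw [List.find?_eq_none]
  intro kv hkv
  simp only [List.mem_map] at hkv
  obtain ⟨m, _, rfl⟩ := hkv
  simp [Prod.ext_iff, h]

-- matching tag: find the first element whose key part matches
lemma find?_tagseg_eq (t : String) (g : String → String) (tag2 : String)
    (l : List String) (q : String) :
    ((l.map (fun m => ((t, g m), (some m, tag2)))).find? (fun kv => kv.1 == (t, q))).map (·.2)
      = (l.find? (fun m => g m == q)).map (fun m => (some m, tag2)) := by
  induction l with
  | nil => simp
  | cons m rest ih =>
    by_cases h : g m = q
    · simp [List.find?, h]
    · have hb : (g m == q) = false := by simp [h]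
      have hb2 : (((t, g m) : String × String) == (t, q)) = false := by
        simp [Prod.ext_iff, h]
      simp only [List.map_cons, List.find?, hb, hb2]
      exact ih

-- the alias segment finds nothing under an "x"/"n" tag
lemma find?_aliasseg_ne (kem sig : List String) (t : String) (q : String) (h : t ≠ "a") :
    (pvAliasItems.filterMap (pvAliasEntry kem sig)).find? (fun kv => kv.1 == (t, q)) = none := by
  rw [List.find?_eq_none]
  intro kv hkv
  simp only [List.mem_filterMap] at hkv
  obtain ⟨p, _, hp⟩ := hkv
  unfold pvAliasEntry at hp
  split at hp
  · cases hp; simp [Prod.ext_iff]; intro h'; exact absurd h'.symm h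
  · cases hp

-- the alias segment under key ("a", q) = A's alias block, over any nodup-key alias table
lemma find?_aliasseg (kem sig : List String) (L : List (String × String)) (q : String)
    (hnd : (L.map Prod.fst).Nodup) :
    ((L.filterMap (pvAliasEntry kem sig)).find? (fun kv => kv.1 == ("a", q))).map (·.2)
      = match (L.find? (fun p => p.1 == q)).map Prod.snd with
        | some c =>
          if kem.contains c then some (some c, "kem")
          else if sig.contains c then some (some c, "sig")
          else none
        | none => none := by
  induction L with
  | nil => simp
  | cons p rest ih =>
    simp only [List.map_cons, List.nodup_cons] at hnd
    by_cases hq : p.1 = q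
    · subst hq
      have hnone : (rest.filterMap (pvAliasEntry kem sig)).find? (fun kv => kv.1 == ("a", p.1)) = none := by
        rw [List.find?_eq_none]
        intro kv hkv
        simp only [List.mem_filterMap] at hkv
        obtain ⟨r, hr, hrk⟩ := hkv
        unfold pvAliasEntry at hrk
        split at hrk
        · cases hrk
          simp only [beq_iff_eq, Prod.mk.injEq, true_and]
          intro h'
          exact hnd.1 (h' ▸ List.mem_map_of_mem hr)
        · cases hrk
      have hfind : List.find? (fun r => r.1 == p.1) (p :: rest) = some p := by
        simp [List.find?]
      rw [hfind]
      by_cases hres : (kem.contains p.2 || sig.contains p.2) = true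
      · have hres' : p.2 ∈ kem ∨ p.2 ∈ sig := by simpa using hres
        have hstep : (p :: rest).filterMap (pvAliasEntry kem sig)
            = (("a", p.1), ((some p.2 : Option String), if p.2 ∈ kem then "kem" else "sig"))
                :: rest.filterMap (pvAliasEntry kem sig) := by
          simp [List.filterMap_cons, pvAliasEntry, hres']
        rw [hstep]
        simp only [List.find?, beq_self_eq_true, Option.map_some]
        by_cases hk : p.2 ∈ kem
        · simp [hk]
        · rcases hres' with hk' | hs
          · exact absurd hk' hk
          · simp [hk, hs]
      · have hres' : ¬(p.2 ∈ kem ∨ p.2 ∈ sig) := by simpa using hres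
        have hstep : (p :: rest).filterMap (pvAliasEntry kem sig)
            = rest.filterMap (pvAliasEntry kem sig) := by
          simp [List.filterMap_cons, pvAliasEntry, hres']
        rw [hstep, hnone]
        push_neg at hres'
        simp [hres'.1, hres'.2]
    · have hb : (p.1 == q) = false := by simp [hq]
      have step : (p :: rest).filterMap (pvAliasEntry kem sig)
          = (pvAliasEntry kem sig p).toList ++ rest.filterMap (pvAliasEntry kem sig) := by
        cases h : pvAliasEntry kem sig p <;> simp [List.filterMap_cons, h]
      rw [step, List.find?_append]
      have hskip : ((pvAliasEntry kem sig p).toList).find? (fun kv => kv.1 == ("a", q)) = none := by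
        unfold pvAliasEntry
        split <;> simp [Prod.ext_iff, hq]
      rw [hskip]
      simp only [Option.none_or, List.find?, hb]
      exact ih hnd.2

-- A's dict lookup on the literal alias table = find? over the literal list
lemma aliases_get?_eq (q : String) :
    (PySem.Dict.ofList pvAliasItems).get? q
      = (pvAliasItems.find? (fun p => p.1 == q)).map Prod.snd := by
  have h : PySem.Dict.ofList pvAliasItems = PySem.Dict.mk pvAliasItems := by decide
  rw [h]
  simp only [pvAliasItems, PySem.Dict.get?_mk_cons]
  by_cases h1 : ("Kyber512" == q) = true
  · simp [List.find?, h1]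
  · simp only [Bool.not_eq_true] at h1
    by_cases h2 : ("Kyber768" == q) = true
    · simp [List.find?, h1, h2]
    · simp only [Bool.not_eq_true] at h2
      by_cases h3 : ("Kyber1024" == q) = true
      · simp [List.find?, h1, h2, h3]
      · simp only [Bool.not_eq_true] at h3
        by_cases h4 : ("Dilithium2" == q) = true
        · simp [List.find?, h1, h2, h3, h4]
        · simp only [Bool.not_eq_true] at h4
          by_cases h5 : ("Dilithium3" == q) = true
          · simp [List.find?, h1, h2, h3, h4, h5]
          · simp only [Bool.not_eq_true] at h5
            by_cases h6 : ("Dilithium5" == q) = true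
            · simp [List.find?, h1, h2, h3, h4, h5, h6]
            · simp only [Bool.not_eq_true] at h6
              simp [List.find?, PySem.Dict.get?, h1, h2, h3, h4, h5, h6]

lemma pvAlias_nodup : (pvAliasItems.map Prod.fst).Nodup := by decide

-- the normalized-scan fallback: B's or-chain of the two "n" finds = A's two scan loops
lemma scans_eq (kem sig : List String) (rq : String) :
    (((kem.find? (fun m => pvNormalize m == rq)).map (fun m => ((some m : Option String), "kem"))).or
       ((sig.find? (fun m => pvNormalize m == rq)).map (fun m => ((some m : Option String), "sig")))).getD (none, "")
      = (match pvScanA rq "kem" kem with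
         | some r => r
         | none =>
           match pvScanA rq "sig" sig with
           | some r => r
           | none => (none, "")) := by
  rw [pvScanA_eq, pvScanA_eq]
  cases kem.find? (fun m => pvNormalize m == rq) <;>
    cases sig.find? (fun m => pvNormalize m == rq) <;> simp [Option.or]

-- ===== VERDICT (by name: the statement is the Claim_ definition above) =====
theorem normalize_oqs_algorithm_py_spec : Claim_equal_normalize_oqs_algorithm_py := by
  intro requested kem_mechs sig_mechs _
  unfold Spec_normalize_oqs_algorithm_py
  unfold normalize_oqs_algorithm_py normalize_oqs_algorithm_py_alt
  by_cases hreq : (requested == "") = true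
  · simp [hreq]
  · simp only [Bool.not_eq_true] at hreq
    simp only [hreq, Bool.false_eq_true, if_false]
    have htab : ∀ k : String × String,
        ((pvPairs kem_mechs sig_mechs).foldl (fun d kv => d.setdefault kv.1 kv.2)
            PySem.Dict.empty).get? k
          = ((pvPairs kem_mechs sig_mechs).find? (fun kv => kv.1 == k)).map (·.2) := by
      intro k
      rw [get?_foldl_setdefault]
      simp [Option.orElse]
    have hx : ((pvPairs kem_mechs sig_mechs).find? (fun kv => kv.1 == ("x", requested))).map (·.2)
        = if kem_mechs.contains requested then some ((some requested : Option String), "kem")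
          else if sig_mechs.contains requested then some ((some requested : Option String), "sig")
          else none := by
      unfold pvPairs
      rw [List.find?_append, List.find?_append, List.find?_append, List.find?_append]
      rw [find?_aliasseg_ne kem_mechs sig_mechs "x" requested (by decide),
          find?_tagseg_ne "n" "x" pvNormalize "kem" kem_mechs requested (by decide),
          find?_tagseg_ne "n" "x" pvNormalize "sig" sig_mechs requested (by decide)]
      simp only [Option.or_none, Option.map_or]
      rw [find?_tagseg_eq "x" (fun m => m) "kem" kem_mechs requested,
          find?_tagseg_eq "x" (fun m => m) "sig" sig_mechs requested]
      rw [find?_beq_self, find?_beq_self]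
      by_cases hk : requested ∈ kem_mechs <;> by_cases hs : requested ∈ sig_mechs <;>
        simp [hk, hs, Option.or]
    have ha : ((pvPairs kem_mechs sig_mechs).find? (fun kv => kv.1 == ("a", requested))).map (·.2)
        = match (PySem.Dict.ofList pvAliasItems).get? requested with
          | some c =>
            if kem_mechs.contains c then some ((some c : Option String), "kem")
            else if sig_mechs.contains c then some ((some c : Option String), "sig")
            else none
          | none => none := by
      unfold pvPairs
      rw [List.find?_append, List.find?_append, List.find?_append, List.find?_append]
      rw [find?_tagseg_ne "x" "a" (fun m => m) "kem" kem_mechs requested (by decide),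
          find?_tagseg_ne "x" "a" (fun m => m) "sig" sig_mechs requested (by decide),
          find?_tagseg_ne "n" "a" pvNormalize "kem" kem_mechs requested (by decide),
          find?_tagseg_ne "n" "a" pvNormalize "sig" sig_mechs requested (by decide)]
      simp only [Option.none_or, Option.or_none]
      rw [find?_aliasseg kem_mechs sig_mechs pvAliasItems requested pvAlias_nodup]
      rw [aliases_get?_eq]
    have hn : ((pvPairs kem_mechs sig_mechs).find? (fun kv => kv.1 == ("n", pvNormalize requested))).map (·.2)
        = ((kem_mechs.find? (fun m => pvNormalize m == pvNormalize requested)).map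
            (fun m => ((some m : Option String), "kem"))).or
          ((sig_mechs.find? (fun m => pvNormalize m == pvNormalize requested)).map
            (fun m => ((some m : Option String), "sig"))) := by
      unfold pvPairs
      rw [List.find?_append, List.find?_append, List.find?_append, List.find?_append]
      rw [find?_tagseg_ne "x" "n" (fun m => m) "kem" kem_mechs (pvNormalize requested) (by decide),
          find?_tagseg_ne "x" "n" (fun m => m) "sig" sig_mechs (pvNormalize requested) (by decide),
          find?_aliasseg_ne kem_mechs sig_mechs "n" (pvNormalize requested) (by decide)]
      simp only [Option.none_or, Option.map_or]
      rw [find?_tagseg_eq "n" pvNormalize "kem" kem_mechs (pvNormalize requested),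
          find?_tagseg_eq "n" pvNormalize "sig" sig_mechs (pvNormalize requested)]
    simp only [htab, hx, ha, hn]
    by_cases hk : requested ∈ kem_mechs
    · simp [hk, Option.orElse]
    · by_cases hs : requested ∈ sig_mechs
      · simp [hk, hs, Option.orElse]
      · cases hal : (PySem.Dict.ofList pvAliasItems).get? requested with
        | none =>
          rw [← scans_eq]
          simp [hk, hs, hal, Option.orElse]
        | some c =>
          have hcne : c ≠ "" := by
            rw [aliases_get?_eq] at hal
            cases hfind : pvAliasItems.find? (fun p => p.1 == requested) with
            | none => rw [hfind] at hal; cases hal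
            | some p =>
              rw [hfind] at hal
              have hp := List.mem_of_find?_eq_some hfind
              simp only [Option.map_some, Option.some.injEq] at hal
              subst hal
              fin_cases hp <;> decide
          by_cases hck : c ∈ kem_mechs
          · simp [hk, hs, hal, hcne, hck, Option.orElse]
          · by_cases hcs : c ∈ sig_mechs
            · simp [hk, hs, hal, hcne, hck, hcs, Option.orElse]
            · rw [← scans_eq]
              simp [hk, hs, hal, hcne, hck, hcs, Option.orElse]
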